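-- pv_equiv track=rewrite | github.com/Swecha-Foundation/corpus-te | app/core/rbac_fastapi.py | get_available_permissions
-- ===== SOURCE A (Python) =====
-- from typing import List, Union, Dict, Set, Optional
--
-- PERMISSION_MATRIX: Dict[str, Dict[str, Set[str]]] = {
--     "admin": {
--         "users": {"GET", "POST", "PUT", "DELETE"},
--         "records": {"GET", "POST", "PUT", "DELETE"},
--         "categories": {"GET", "POST", "PUT", "DELETE"},
--     },
--     "reviewer": {
--         "users": {"GET"},
--         "records": {"GET", "PUT"},
--         "categories": {"GET"},
--     },
--     "user": {
--         "records": {"GET", "POST", "PUT"},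
--         "categories": {"GET"},
--     }
-- }
--
-- def get_available_permissions(user_roles: List[str]) -> Dict[str, Set[str]]:
--     """
--     Get all available permissions for a user based on their roles.
--
--     Returns:
--         Dict mapping resource names to sets of allowed methods
--     """
--     permissions = {}
--
--     for role in user_roles:
--         role_lower = role.lower()
--         if role_lower in PERMISSION_MATRIX:
--             for resource, methods in PERMISSION_MATRIX[role_lower].items():
--                 if resource not in permissions:
--                     permissions[resource] = set()
--                 permissions[resource].update(methods)
--
--     return permissions
-- ===== SOURCE B (Python) =====
-- from typing import List, Union, Dict, Set, Optional
--
-- PERMISSION_MATRIX: Dict[str, Dict[str, Set[str]]] = {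
--     "admin": {
--         "users": {"GET", "POST", "PUT", "DELETE"},
--         "records": {"GET", "POST", "PUT", "DELETE"},
--         "categories": {"GET", "POST", "PUT", "DELETE"},
--     },
--     "reviewer": {
--         "users": {"GET"},
--         "records": {"GET", "PUT"},
--         "categories": {"GET"},
--     },
--     "user": {
--         "records": {"GET", "POST", "PUT"},
--         "categories": {"GET"},
--     }
-- }
--
-- def get_available_permissions(user_roles: List[str]) -> Dict[str, Set[str]]:
--     # Phase 1: the valid roles, then the resources reachable from them (first-seen order).
--     valid = [rl for rl in (r.lower() for r in user_roles) if rl in PERMISSION_MATRIX]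
--     reachable = list(dict.fromkeys(res for rl in valid for res in PERMISSION_MATRIX[rl]))
--     # Phase 2: per reachable resource, union the method sets of every valid role that has it.
--     return {res: set().union(*(PERMISSION_MATRIX[rl][res]
--                                for rl in valid if res in PERMISSION_MATRIX[rl]))
--             for res in reachable}
-- ===== Notes on version B (the rewrite author's own statement) =====
-- stated objective: alternative
-- what changed: A streams role-by-role, mutating one accumulating dict of sets; B is two-phase: it first computes the valid roles and the index of reachable resources, then builds the result with a per-resource dict comprehension that unions the method sets of every valid role containing that resource.
import Mathlib
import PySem

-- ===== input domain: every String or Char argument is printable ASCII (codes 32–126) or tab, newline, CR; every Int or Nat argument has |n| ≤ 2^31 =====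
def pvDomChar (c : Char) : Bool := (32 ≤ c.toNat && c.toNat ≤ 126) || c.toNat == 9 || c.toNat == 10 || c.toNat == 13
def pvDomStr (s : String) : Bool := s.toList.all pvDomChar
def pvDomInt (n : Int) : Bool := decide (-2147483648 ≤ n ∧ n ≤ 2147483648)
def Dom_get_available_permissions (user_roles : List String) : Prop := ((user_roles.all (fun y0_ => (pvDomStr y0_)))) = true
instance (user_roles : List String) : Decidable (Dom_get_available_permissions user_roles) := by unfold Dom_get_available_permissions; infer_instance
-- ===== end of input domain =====

-- B re-decomposes A's streaming dict accumulation into two phases (valid roles + reachable-resource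
-- index, then a per-resource union comprehension); alternative decomposition, same value, same cost.
-- Python sets are ported as insertion-ordered distinct lists (set literals in source order).

-- ===== PORT A =====
def PERMISSION_MATRIX : PySem.Dict String (PySem.Dict String (PySem.Set String)) :=
  ⟨[("admin", ⟨[("users", ["GET", "POST", "PUT", "DELETE"]),
               ("records", ["GET", "POST", "PUT", "DELETE"]),
               ("categories", ["GET", "POST", "PUT", "DELETE"])]⟩),
    ("reviewer", ⟨[("users", ["GET"]),
                  ("records", ["GET", "PUT"]),
                  ("categories", ["GET"])]⟩),
    ("user", ⟨[("records", ["GET", "POST", "PUT"]),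
               ("categories", ["GET"])]⟩)]⟩

-- inner loop body: 'if resource not in permissions: permissions[resource] = set()';
-- 'permissions[resource].update(methods)'
def pvStepA (d : PySem.Dict String (PySem.Set String)) (p : String × PySem.Set String) :
    PySem.Dict String (PySem.Set String) :=
  let cur := if d.contains p.1 then d else d.insert p.1 PySem.Set.empty
  cur.insert p.1 (List.foldl PySem.Set.add (cur.getD p.1 PySem.Set.empty) p.2)

-- one iteration of A's outer loop, after lowering: 'if role_lower in PERMISSION_MATRIX: for …'
def pvMergeRole (d : PySem.Dict String (PySem.Set String)) (role_lower : String) :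
    PySem.Dict String (PySem.Set String) :=
  match PERMISSION_MATRIX.get? role_lower with
  | some row => row.items.foldl pvStepA d
  | none => d

def get_available_permissions (user_roles : List String) : List (String × List String) :=
  (user_roles.foldl (fun permissions role => pvMergeRole permissions (PySem.Str.lower role))
    (⟨[]⟩ : PySem.Dict String (PySem.Set String))).items

-- ===== PORT B =====
-- 'res for res in PERMISSION_MATRIX[rl]'
def pvKeysOf (rl : String) : List String :=
  ((PERMISSION_MATRIX.getD rl ⟨[]⟩).items.map Prod.fst)

-- 'PERMISSION_MATRIX[rl][res] if res in PERMISSION_MATRIX[rl]'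
def pvMethodsOf (rl res : String) : Option (PySem.Set String) :=
  (PERMISSION_MATRIX.getD rl ⟨[]⟩).get? res

def get_available_permissions_alt (user_roles : List String) : List (String × List String) :=
  let valid := (user_roles.map (fun r => PySem.Str.lower r)).filter
    (fun rl => PERMISSION_MATRIX.contains rl)
  let reachable := PySem.List.dedup (valid.flatMap pvKeysOf)
  reachable.map (fun res => (res,
    valid.foldl (fun acc rl =>
      match pvMethodsOf rl res with
      | some ms => List.foldl PySem.Set.add acc ms
      | none => acc) PySem.Set.empty))

-- ===== PRECONDITION & SPEC =====
def Spec_get_available_permissions (user_roles : List String) (out : List (String × List String)) : Prop := out = get_available_permissions_alt user_roles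
instance (user_roles : List String) (out : List (String × List String)) : Decidable (Spec_get_available_permissions user_roles out) := by unfold Spec_get_available_permissions; infer_instance

-- ===== CLAIM (what is proved, stated in full; the proofs are below) =====
def Claim_equal_get_available_permissions : Prop := ∀ (user_roles : List String), Dom_get_available_permissions user_roles → Spec_get_available_permissions user_roles (get_available_permissions user_roles)

-- ===== LEMMAS AND PROOFS =====

-- abstract view of a permissions dict: a key list R plus a value function f
def pvConc (R : List String) (f : String → PySem.Set String) : List (String × List String) :=
  R.map (fun res => (res, f res))

def pvUpdF (f : String → PySem.Set String) (k : String) (ms : PySem.Set String) :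
    String → PySem.Set String :=
  fun x => if x = k then List.foldl PySem.Set.add (f k) ms else f x

-- B's per-resource value after the valid-role list vl
def pvV (vl : List String) (res : String) : PySem.Set String :=
  vl.foldl (fun acc rl =>
    match pvMethodsOf rl res with
    | some ms => List.foldl PySem.Set.add acc ms
    | none => acc) PySem.Set.empty

-- B's reachable resources after vl
def pvR (vl : List String) : List String := PySem.Set.ofList (vl.flatMap pvKeysOf)

def pvBf (vl : List String) : List (String × List String) := pvConc (pvR vl) (pvV vl)

lemma pv_contains_conc (R : List String) (f : String → PySem.Set String) (k : String) :
    PySem.Dict.contains ⟨pvConc R f⟩ k = decide (k ∈ R) := by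
  induction R with
  | nil => rfl
  | cons a R ih =>
    simp only [pvConc, List.map_cons, PySem.Dict.contains, List.any_cons] at *
    by_cases h : a = k
    · subst h; simp
    · have hb : ((a, f a).1 == k) = false := by simpa using h
      rw [hb]
      simpa [List.mem_cons, Ne.symm h] using ih

lemma pv_get?_conc (R : List String) (f : String → PySem.Set String) (k : String) :
    PySem.Dict.get? ⟨pvConc R f⟩ k = if k ∈ R then some (f k) else none := by
  induction R with
  | nil => rfl
  | cons a R ih =>
    simp only [pvConc, List.map_cons, PySem.Dict.get?, List.find?_cons] at *
    by_cases h : a = k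
    · subst h; simp
    · have hb : ((a, f a).1 == k) = false := by simpa using h
      rw [hb]
      simpa [List.mem_cons, Ne.symm h] using ih

lemma pv_insert_conc_mem (R : List String) (f : String → PySem.Set String) (k : String)
    (v : PySem.Set String) (h : k ∈ R) :
    PySem.Dict.insert ⟨pvConc R f⟩ k v = ⟨pvConc R (fun x => if x = k then v else f x)⟩ := by
  simp only [PySem.Dict.insert, pv_contains_conc, h, decide_true, if_true]
  congr 1
  simp only [pvConc, List.map_map]
  apply List.map_congr_left
  intro x _
  by_cases hx : x = k
  · subst hx; simp
  · simp [hx]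

lemma pv_step_conc (R : List String) (f : String → PySem.Set String) (k : String)
    (ms : PySem.Set String) (hk : k ∉ R → f k = []) :
    pvStepA ⟨pvConc R f⟩ (k, ms) = ⟨pvConc (PySem.Set.add R k) (pvUpdF f k ms)⟩ := by
  by_cases hm : k ∈ R
  · have hR : PySem.Set.add R k = R := by simp [PySem.Set.add, hm]
    simp only [pvStepA, pv_contains_conc, hm, decide_true, if_true,
      PySem.Dict.getD, pv_get?_conc, Option.getD_some,
      pv_insert_conc_mem R f k _ hm, hR]
    rfl
  · have hR : PySem.Set.add R k = R ++ [k] := by simp [PySem.Set.add, hm]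
    have hins : PySem.Dict.insert ⟨pvConc R f⟩ k PySem.Set.empty = ⟨pvConc (R ++ [k]) f⟩ := by
      simp only [PySem.Dict.insert, pv_contains_conc, hm, decide_false, Bool.false_eq_true,
        if_false]
      congr 1
      simp [pvConc, hk hm, PySem.Set.empty]
    have hmem : k ∈ R ++ [k] := by simp
    simp only [pvStepA, pv_contains_conc, hm, decide_false, Bool.false_eq_true, if_false, hins,
      PySem.Dict.getD, pv_get?_conc, hmem, if_true, Option.getD_some,
      pv_insert_conc_mem (R ++ [k]) f k _ hmem, hR]
    rfl

lemma pv_mem_foldl_add (l : List String) (s : PySem.Set String) (y : String) :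
    y ∈ List.foldl PySem.Set.add s l ↔ y ∈ s ∨ y ∈ l := by
  induction l generalizing s with
  | nil => simp
  | cons a l ih => simp [PySem.Set.mem_add, ih, or_assoc]

lemma pv_get?_none {d : PySem.Dict String (PySem.Set String)} {res : String}
    (h : res ∉ d.items.map Prod.fst) : d.get? res = none := by
  simp only [PySem.Dict.get?, Option.map_eq_none_iff, List.find?_eq_none]
  intro p hp
  simp only [beq_iff_eq]
  intro hpe
  exact h (hpe ▸ List.mem_map_of_mem hp)

lemma pv_R_append (vl : List String) (rl : String) :
    pvR (vl ++ [rl]) = List.foldl PySem.Set.add (pvR vl) (pvKeysOf rl) := by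
  simp [pvR, PySem.Set.ofList, List.foldl_append]

lemma pv_V_append (vl : List String) (rl res : String) :
    pvV (vl ++ [rl]) res =
      match pvMethodsOf rl res with
      | some ms => List.foldl PySem.Set.add (pvV vl res) ms
      | none => pvV vl res := by
  simp [pvV, List.foldl_append]

lemma pv_get?_none_of_not_contains {ν : Type} (d : PySem.Dict String ν) (k : String)
    (h : d.contains k = false) : d.get? k = none := by
  simp only [PySem.Dict.contains, List.any_eq_false, beq_iff_eq] at h
  simp only [PySem.Dict.get?, Option.map_eq_none_iff, List.find?_eq_none, beq_iff_eq]
  exact h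

lemma pv_V_empty (vl : List String) (res : String) (h : res ∉ pvR vl) : pvV vl res = [] := by
  induction vl using List.reverseRecOn with
  | nil => rfl
  | append_singleton vl rl ih =>
    rw [pv_R_append] at h
    rw [pv_mem_foldl_add] at h
    rw [not_or] at h
    have hnone : pvMethodsOf rl res = none := by
      unfold pvMethodsOf
      exact pv_get?_none (by simpa [pvKeysOf] using h.2)
    rw [pv_V_append, hnone]
    exact ih h.1

lemma pv_fold_steps (row : List (String × PySem.Set String)) (R : List String)
    (f : String → PySem.Set String) (hnd : (row.map Prod.fst).Nodup)
    (hf : ∀ k, k ∉ R → f k = []) :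
    List.foldl pvStepA ⟨pvConc R f⟩ row =
      ⟨pvConc (List.foldl PySem.Set.add R (row.map Prod.fst))
        (fun x => match (List.find? (fun p => p.1 == x) row).map Prod.snd with
          | some ms => List.foldl PySem.Set.add (f x) ms
          | none => f x)⟩ := by
  induction row generalizing R f with
  | nil => simp [pvConc]
  | cons p rest ih =>
    obtain ⟨k, ms⟩ := p
    simp only [List.map_cons, List.nodup_cons] at hnd
    rw [List.foldl_cons, pv_step_conc R f k ms (hf k),
      ih _ _ hnd.2 (fun k' hk' => by
        have hk'R : k' ∉ R := fun h => hk' (by rw [PySem.Set.mem_add]; exact Or.inl h)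
        have hk'k : ¬ k' = k := fun h => hk' (by rw [PySem.Set.mem_add]; exact Or.inr h)
        simp only [pvUpdF, if_neg hk'k]
        exact hf k' hk'R)]
    refine congrArg PySem.Dict.mk ?_
    rw [List.map_cons, List.foldl_cons]
    refine congrArg (pvConc _) (funext fun x => ?_)
    by_cases hx : x = k
    · subst hx
      have hrest : List.find? (fun p => p.1 == x) rest = none := by
        rw [List.find?_eq_none]
        intro q hq
        simp only [beq_iff_eq]
        exact fun e => hnd.1 (e ▸ List.mem_map_of_mem hq)
      simp [hrest, pvUpdF]
    · have hb : (((k, ms) : String × PySem.Set String).1 == x) = false := by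
        simpa using fun e => hx e.symm
      rw [List.find?_cons, hb]
      cases List.find? (fun p => p.1 == x) rest <;> simp [pvUpdF, hx]

lemma pv_key (vl : List String) (rl : String) :
    pvMergeRole ⟨pvBf vl⟩ rl = ⟨pvBf (vl ++ [rl])⟩ := by
  by_cases h1 : rl = "admin"
  · subst h1
    show List.foldl pvStepA ⟨pvConc (pvR vl) (pvV vl)⟩
      [("users", ["GET", "POST", "PUT", "DELETE"]),
       ("records", ["GET", "POST", "PUT", "DELETE"]),
       ("categories", ["GET", "POST", "PUT", "DELETE"])] = ⟨pvBf (vl ++ ["admin"])⟩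
    rw [pv_fold_steps _ (pvR vl) (pvV vl) (by decide) (pv_V_empty vl)]
    refine congrArg PySem.Dict.mk ?_
    unfold pvBf
    rw [show pvR (vl ++ ["admin"]) = List.foldl PySem.Set.add (pvR vl)
      ([("users", (["GET", "POST", "PUT", "DELETE"] : PySem.Set String)),
        ("records", ["GET", "POST", "PUT", "DELETE"]),
        ("categories", ["GET", "POST", "PUT", "DELETE"])].map Prod.fst) from by
        rw [pv_R_append]; rfl]
    exact congrArg (pvConc _) (funext fun x => by rw [pv_V_append]; rfl)
  · by_cases h2 : rl = "reviewer"
    · subst h2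
      show List.foldl pvStepA ⟨pvConc (pvR vl) (pvV vl)⟩
        [("users", ["GET"]), ("records", ["GET", "PUT"]), ("categories", ["GET"])] =
        ⟨pvBf (vl ++ ["reviewer"])⟩
      rw [pv_fold_steps _ (pvR vl) (pvV vl) (by decide) (pv_V_empty vl)]
      refine congrArg PySem.Dict.mk ?_
      unfold pvBf
      rw [show pvR (vl ++ ["reviewer"]) = List.foldl PySem.Set.add (pvR vl)
        ([("users", (["GET"] : PySem.Set String)), ("records", ["GET", "PUT"]),
          ("categories", ["GET"])].map Prod.fst) from by rw [pv_R_append]; rfl]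
      exact congrArg (pvConc _) (funext fun x => by rw [pv_V_append]; rfl)
    · by_cases h3 : rl = "user"
      · subst h3
        show List.foldl pvStepA ⟨pvConc (pvR vl) (pvV vl)⟩
          [("records", ["GET", "POST", "PUT"]), ("categories", ["GET"])] =
          ⟨pvBf (vl ++ ["user"])⟩
        rw [pv_fold_steps _ (pvR vl) (pvV vl) (by decide) (pv_V_empty vl)]
        refine congrArg PySem.Dict.mk ?_
        unfold pvBf
        rw [show pvR (vl ++ ["user"]) = List.foldl PySem.Set.add (pvR vl)
          ([("records", (["GET", "POST", "PUT"] : PySem.Set String)),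
            ("categories", ["GET"])].map Prod.fst) from by rw [pv_R_append]; rfl]
        exact congrArg (pvConc _) (funext fun x => by rw [pv_V_append]; rfl)
      · -- role not in the matrix: A skips it, B reaches no resource through it
        have hget : PERMISSION_MATRIX.get? rl = none := by
          have hb1 : ("admin" == rl) = false := by simpa using fun e => h1 e.symm
          have hb2 : ("reviewer" == rl) = false := by simpa using fun e => h2 e.symm
          have hb3 : ("user" == rl) = false := by simpa using fun e => h3 e.symm
          simp [PERMISSION_MATRIX, PySem.Dict.get?, List.find?_nil,
            hb1, hb2, hb3]
        have hkeys : pvKeysOf rl = [] := by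
          simp [pvKeysOf, PySem.Dict.getD, hget]
        have hmeth : ∀ res, pvMethodsOf rl res = none := by
          intro res
          simp only [pvMethodsOf, PySem.Dict.getD, hget, Option.getD_none]
          rfl
        have hBf : pvBf (vl ++ [rl]) = pvBf vl := by
          unfold pvBf
          rw [pv_R_append, hkeys, List.foldl_nil]
          exact congrArg (pvConc _) (funext fun x => by rw [pv_V_append, hmeth])
        unfold pvMergeRole
        rw [hget, hBf]

lemma pv_main (vl : List String) :
    (List.foldl pvMergeRole (⟨[]⟩ : PySem.Dict String (PySem.Set String)) vl).items = pvBf vl := by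
  induction vl using List.reverseRecOn with
  | nil => rfl
  | append_singleton vl rl ih =>
    have : List.foldl pvMergeRole (⟨[]⟩ : PySem.Dict String (PySem.Set String)) vl = ⟨pvBf vl⟩ := by
      cases h : List.foldl pvMergeRole (⟨[]⟩ : PySem.Dict String (PySem.Set String)) vl with
      | mk items => simpa [h] using ih
    rw [List.foldl_append, List.foldl_cons, List.foldl_nil, this, pv_key]

lemma pv_A_valid (ur : List String) (e : PySem.Dict String (PySem.Set String)) :
    ur.foldl (fun d r => pvMergeRole d (PySem.Str.lower r)) e =
      List.foldl pvMergeRole e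
        ((ur.map (fun r => PySem.Str.lower r)).filter (fun rl => PERMISSION_MATRIX.contains rl)) := by
  induction ur generalizing e with
  | nil => rfl
  | cons r ur ih =>
    simp only [List.foldl_cons, List.map_cons, List.filter_cons]
    by_cases h : PERMISSION_MATRIX.contains (PySem.Str.lower r) = true
    · rw [if_pos h, List.foldl_cons]
      exact ih _
    · have hskip : pvMergeRole e (PySem.Str.lower r) = e := by
        unfold pvMergeRole
        rw [pv_get?_none_of_not_contains _ _ (by simpa using h)]
      rw [if_neg (by simpa using h), hskip]
      exact ih e

-- ===== VERDICT (by name: the statement is the Claim_ definition above) =====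
theorem get_available_permissions_spec : Claim_equal_get_available_permissions := by
  intro ur _
  unfold Spec_get_available_permissions get_available_permissions get_available_permissions_alt
  rw [pv_A_valid, pv_main]
  rfl
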